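-- pv_equiv track=rewrite | github.com/ruthgrace/cantonese_soup | app.py | load_recipes_per_ingredient
-- ===== SOURCE A (Python) =====
-- def load_recipes_per_ingredient(recipes, ingredients):
--     recipes_per_ingredient = {}
--     for recipe in recipes:
--         for ingredient in recipes[recipe]["ingredients"]:
--             if ingredient not in recipes_per_ingredient:
--                 recipes_per_ingredient[ingredient] = set()
--             if recipe not in recipes_per_ingredient[ingredient]:
--                 recipes_per_ingredient[ingredient].add(recipe)
--     return recipes_per_ingredient
-- ===== SOURCE B (Python) =====
-- def load_recipes_per_ingredient(recipes, ingredients):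
--     occurring = dict.fromkeys(
--         ingredient for recipe in recipes
--         for ingredient in recipes[recipe]["ingredients"])
--     return {ingredient: {recipe for recipe in recipes
--                          if ingredient in recipes[recipe]["ingredients"]}
--             for ingredient in occurring}
-- ===== Notes on version B (the rewrite author's own statement) =====
-- stated objective: alternative
-- what changed: Instead of A's single pass that accumulates a dict of sets recipe-by-recipe, B first collects the ordered set of occurring ingredients with dict.fromkeys and then builds the result as a dict comprehension whose value for each ingredient is a set comprehension rescanning the recipes (loop nesting flipped to ingredient-outer/recipe-inner).
import Mathlib
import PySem

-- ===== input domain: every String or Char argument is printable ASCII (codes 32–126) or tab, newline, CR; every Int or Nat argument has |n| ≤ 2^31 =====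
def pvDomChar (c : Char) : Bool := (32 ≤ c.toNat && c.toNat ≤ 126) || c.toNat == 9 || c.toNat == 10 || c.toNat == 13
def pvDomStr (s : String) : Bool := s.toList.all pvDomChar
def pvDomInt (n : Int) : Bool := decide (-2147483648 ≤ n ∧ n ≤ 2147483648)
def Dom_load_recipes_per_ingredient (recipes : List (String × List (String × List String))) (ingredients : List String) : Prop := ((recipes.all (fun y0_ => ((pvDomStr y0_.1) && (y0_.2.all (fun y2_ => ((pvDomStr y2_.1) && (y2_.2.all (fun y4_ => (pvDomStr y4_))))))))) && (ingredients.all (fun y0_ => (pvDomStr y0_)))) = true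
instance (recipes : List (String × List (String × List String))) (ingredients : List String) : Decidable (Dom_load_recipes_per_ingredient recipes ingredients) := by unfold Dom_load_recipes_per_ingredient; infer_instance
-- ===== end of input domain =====

-- B flips the loop nesting: it first builds the ordered list of occurring ingredients, then
-- constructs each ingredient's recipe set by a comprehension over the recipes (objective:
-- alternative decomposition).

-- ===== PORT A =====
-- shared lookup helper: recipes[name]["ingredients"] (both Pythons use this very expression;
-- the total .getD form is exact under Pre_, which guarantees the "ingredients" key is present)
def pvIngredientsOf (recipes : List (String × List (String × List String))) (name : String) : List String :=
  (PySem.Dict.mk ((PySem.Dict.mk recipes).getD name [])).getD "ingredients" []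

-- A's inner-loop body: if ingredient not in d: d[ingredient] = set(); if recipe not in d[ingredient]: d[ingredient].add(recipe)

def pvStep (r : String) (acc : PySem.Dict String (PySem.Set String)) (ingredient : String) : PySem.Dict String (PySem.Set String) :=
  let acc := if acc.contains ingredient then acc else acc.insert ingredient PySem.Set.empty
  if PySem.Set.contains (acc.getD ingredient PySem.Set.empty) r then acc
  else acc.insert ingredient (PySem.Set.add (acc.getD ingredient PySem.Set.empty) r)


-- literal transliteration of A: one pass over the recipes, accumulating a dict ingredient → set of recipes
def load_recipes_per_ingredient (recipes : List (String × List (String × List String))) (ingredients : List String) : List (String × List String) :=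
  (recipes.foldl
    (fun (acc : PySem.Dict String (PySem.Set String)) rp => (pvIngredientsOf recipes rp.1).foldl (pvStep rp.1) acc)
    PySem.Dict.empty).items

-- ===== PORT B =====
-- literal transliteration of B: dict.fromkeys over the flattened ingredient lists, then a
-- dict comprehension whose value is a set comprehension over the recipes
def load_recipes_per_ingredient_alt (recipes : List (String × List (String × List String))) (ingredients : List String) : List (String × List String) :=
  let occurring := PySem.List.dedup (recipes.flatMap (fun rp => pvIngredientsOf recipes rp.1))
  occurring.map (fun ingredient =>
    (ingredient,
     PySem.Set.ofList ((recipes.filter (fun rp => ingredient ∈ pvIngredientsOf recipes rp.1)).map Prod.fst)))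

-- ===== PRECONDITION & SPEC =====
-- Pre_ excludes exactly the inputs on which recipes[recipe]["ingredients"] raises KeyError
-- (some inner dict lacks the "ingredients" key); both Pythons raise there.
def Pre_load_recipes_per_ingredient (recipes : List (String × List (String × List String))) (ingredients : List String) : Prop :=
  ∀ p ∈ recipes, (PySem.Dict.mk ((PySem.Dict.mk recipes).getD p.1 [])).contains "ingredients" = true
instance (recipes : List (String × List (String × List String))) (ingredients : List String) : Decidable (Pre_load_recipes_per_ingredient recipes ingredients) := by unfold Pre_load_recipes_per_ingredient; infer_instance

def pvWitness_load_recipes_per_ingredient : (List (String × List (String × List String))) × List String :=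
  ([("soup", [("ingredients", ["carrot", "pork"])]), ("stew", [("ingredients", ["pork"])])], ["carrot"])

def Spec_load_recipes_per_ingredient (recipes : List (String × List (String × List String))) (ingredients : List String) (out : List (String × List String)) : Prop := out = load_recipes_per_ingredient_alt recipes ingredients
instance (recipes : List (String × List (String × List String))) (ingredients : List String) (out : List (String × List String)) : Decidable (Spec_load_recipes_per_ingredient recipes ingredients out) := by unfold Spec_load_recipes_per_ingredient; infer_instance

-- ===== CLAIM (what is proved, stated in full; the proofs are below) =====
def Claim_equal_load_recipes_per_ingredient : Prop := ∀ (recipes : List (String × List (String × List String))) (ingredients : List String), Dom_load_recipes_per_ingredient recipes ingredients → Pre_load_recipes_per_ingredient recipes ingredients → Spec_load_recipes_per_ingredient recipes ingredients (load_recipes_per_ingredient recipes ingredients)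

-- ===== LEMMAS AND PROOFS =====
lemma add_of_not_mem (s : PySem.Set String) (x : String) (h : x ∉ s) :
    PySem.Set.add s x = s ++ [x] := by
  simp [PySem.Set.add, PySem.Set.contains, h]

lemma pvStep_keys (r : String) (acc : PySem.Dict String (PySem.Set String)) (ing : String) :
    (pvStep r acc ing).keys = PySem.Set.add acc.keys ing := by
  unfold pvStep
  by_cases hm : ing ∈ acc.keys
  · have hc : acc.contains ing = true := (PySem.Dict.contains_iff_mem_keys acc ing).mpr hm
    rw [PySem.Set.add_of_mem hm]
    simp only [hc, if_true]
    split_ifs with h2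
    · rfl
    · exact PySem.Dict.keys_insert_of_contains acc _ hc
  · have hc : acc.contains ing = false := by
      rw [← Bool.not_eq_true]
      exact fun h => hm ((PySem.Dict.contains_iff_mem_keys acc ing).mp h)
    rw [add_of_not_mem _ _ hm]
    simp only [hc, Bool.false_eq_true, if_false]
    have hkeys := PySem.Dict.keys_insert_of_not_contains acc (v := (PySem.Set.empty : PySem.Set String)) (k := ing) hc
    split_ifs with h2
    · exact hkeys
    · rw [PySem.Dict.keys_insert_of_contains _ _ (PySem.Dict.contains_insert_self acc ing _), hkeys]

lemma pvStep_getD (r : String) (acc : PySem.Dict String (PySem.Set String)) (ing i : String) :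
    (pvStep r acc ing).getD i [] =
      if i = ing then PySem.Set.add (acc.getD ing []) r else acc.getD i [] := by
  unfold pvStep
  have hempty : (PySem.Set.empty : PySem.Set String) = [] := rfl
  by_cases hc : acc.contains ing = true
  · simp only [hc, if_true, hempty]
    by_cases hr : PySem.Set.contains (acc.getD ing []) r = true
    · simp only [hr, if_true]
      by_cases hi : i = ing
      · subst hi
        rw [if_pos rfl, PySem.Set.add]
        simp only [PySem.Set.contains] at hr
        simpa using hr
      · rw [if_neg hi]
    · simp only [hr, Bool.false_eq_true, if_false]
      by_cases hi : i = ing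
      · subst hi; simp
      · simp [PySem.Dict.getD_insert, hi]
  · simp only [hc, Bool.false_eq_true, if_false, hempty]
    have hg : (acc.insert ing []).getD ing [] = [] := by
      simp
    have hacc : acc.getD ing [] = [] :=
      PySem.Dict.getD_of_not_contains acc [] (by simpa using hc)
    rw [hg]
    have hcontains : PySem.Set.contains ([] : PySem.Set String) r = false := rfl
    simp only [hcontains, Bool.false_eq_true, if_false]
    by_cases hi : i = ing
    · subst hi
      simp [hacc]
    · simp [PySem.Dict.getD_insert, hi]

lemma pvInner_keys (r : String) (ings : List String) (acc : PySem.Dict String (PySem.Set String)) :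
    (ings.foldl (pvStep r) acc).keys = PySem.Set.update acc.keys ings := by
  induction ings generalizing acc with
  | nil => rfl
  | cons x xs ih => simp only [List.foldl_cons, PySem.Set.update, ih, pvStep_keys]

lemma pvInner_getD (r : String) (ings : List String) (acc : PySem.Dict String (PySem.Set String)) (i : String) :
    (ings.foldl (pvStep r) acc).getD i [] =
      if i ∈ ings then PySem.Set.add (acc.getD i []) r else acc.getD i [] := by
  induction ings generalizing acc with
  | nil => simp
  | cons x xs ih =>
    simp only [List.foldl_cons, ih, pvStep_getD, List.mem_cons]
    by_cases hi : i = x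
    · subst hi
      by_cases hm : i ∈ xs
      · simp [hm]
      · simp [hm]
    · simp [hi]

def pvFoldA (f : (String × List (String × List String)) → List String)
    (l : List (String × List (String × List String))) : PySem.Dict String (PySem.Set String) :=
  l.foldl (fun acc rp => (f rp).foldl (pvStep rp.1) acc) PySem.Dict.empty

lemma pvFoldA_keys (f : (String × List (String × List String)) → List String)
    (l : List (String × List (String × List String))) :
    (pvFoldA f l).keys = PySem.Set.ofList (l.flatMap f) := by
  induction l using List.reverseRecOn with
  | nil => rfl
  | append_singleton l p ih =>
    simp only [pvFoldA, List.foldl_append, List.foldl_cons, List.foldl_nil] at *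
    rw [pvInner_keys, ih]
    simp [PySem.Set.ofList, PySem.Set.update, List.foldl_append]

lemma pvFoldA_getD (f : (String × List (String × List String)) → List String)
    (l : List (String × List (String × List String))) (i : String) :
    (pvFoldA f l).getD i [] =
      PySem.Set.ofList ((l.filter (fun rp => decide (i ∈ f rp))).map Prod.fst) := by
  induction l using List.reverseRecOn with
  | nil => simp [pvFoldA, PySem.Set.ofList, PySem.Set.empty]
  | append_singleton l p ih =>
    simp only [pvFoldA, List.foldl_append, List.foldl_cons, List.foldl_nil] at *
    rw [pvInner_getD, ih]
    by_cases hm : i ∈ f p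
    · simp [hm, List.filter_append, PySem.Set.ofList, List.foldl_append]
    · simp [hm, List.filter_append]

lemma pvFoldA_items (f : (String × List (String × List String)) → List String)
    (l : List (String × List (String × List String))) :
    (pvFoldA f l).items =
      (PySem.List.dedup (l.flatMap f)).map (fun i =>
        (i, PySem.Set.ofList ((l.filter (fun rp => decide (i ∈ f rp))).map Prod.fst))) := by
  have hnd : (pvFoldA f l).keys.Nodup := by
    rw [pvFoldA_keys]; exact PySem.Set.nodup_ofList _
  rw [PySem.Dict.items_eq_map_keys _ hnd [], pvFoldA_keys, PySem.List.dedup_eq_ofList]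
  exact List.map_congr_left (fun i _ => by rw [pvFoldA_getD])

-- ===== VERDICT (by name: the statement is the Claim_ definition above) =====
theorem load_recipes_per_ingredient_spec : Claim_equal_load_recipes_per_ingredient := by
  intro recipes ingredients _ _
  unfold Spec_load_recipes_per_ingredient load_recipes_per_ingredient load_recipes_per_ingredient_alt
  exact pvFoldA_items (fun rp => pvIngredientsOf recipes rp.1) recipes
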